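-- pv_equiv track=rewrite | github.com/fastmachinelearning/hls4ml | hls4ml/backends/fpga/fpga_backend.py | compute_conv1d_instructions
-- ===== SOURCE A (Python) =====
-- import math
--
-- def compute_conv1d_instructions(in_W, in_C, kernel_size=3, stride=1, pad=0):
--     # Current limitations
--     assert pad == 0
--
--     if kernel_size >= stride:
--         min_W = (math.ceil(kernel_size / stride) - 1) * stride + kernel_size
--     else:
--         min_W = (math.ceil(stride / kernel_size) - 1) * stride + kernel_size
--
--     # if the standard min_W is smaller than the in_W, then use unscaled
--     if min_W > in_W:
--         min_W = in_W
--
--     min_oW = int((min_W - kernel_size) // stride + 1)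
--
--     out_W = int((in_W - kernel_size) // stride + 1)
--     scaled_W = (out_W - 1) * stride + kernel_size
--
--     if scaled_W < in_W:
--         min_W += 1
--
--     windows_bin = [[0 for _ in range(kernel_size)] for _ in range(min_W)]
--
--     for i_ow in range(min_oW):
--         for i_fw in range(kernel_size):
--             index_data = i_ow * stride + i_fw - pad
--             windows_bin[index_data][i_fw] = 1
--
--     windows_int = []
--
--     for i in range(min_W):
--         windows_int.append(int(''.join(str(p) for p in reversed(windows_bin[i])), 2))
--
--     return (min_W, windows_int)
-- ===== SOURCE B (Python) =====
-- import math
--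
-- def compute_conv1d_instructions(in_W, in_C, kernel_size=3, stride=1, pad=0):
--     # Current limitations
--     assert pad == 0
--
--     if kernel_size >= stride:
--         min_W = (math.ceil(kernel_size / stride) - 1) * stride + kernel_size
--     else:
--         min_W = (math.ceil(stride / kernel_size) - 1) * stride + kernel_size
--
--     if min_W > in_W:
--         min_W = in_W
--
--     min_oW = int((min_W - kernel_size) // stride + 1)
--
--     out_W = int((in_W - kernel_size) // stride + 1)
--     scaled_W = (out_W - 1) * stride + kernel_size
--
--     if scaled_W < in_W:
--         min_W += 1
--
--     # Gather form: build each output word directly by asking, for every data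
--     # position i and tap i_fw, whether some window i_ow in range(min_oW) reads
--     # position i through tap i_fw (i.e. i_ow*stride + i_fw - pad == i).  No bit
--     # matrix, no mutation, no string packing.
--     windows_int = []
--     for i in range(min_W):
--         word = 0
--         for i_fw in range(kernel_size):
--             i_ow, r = divmod(i + pad - i_fw, stride)
--             if r == 0 and 0 <= i_ow < min_oW:
--                 word += 1 << i_fw
--         windows_int.append(word)
--
--     return (min_W, windows_int)
-- ===== Notes on version B (the rewrite author's own statement) =====
-- stated objective: alternative
-- what changed: B replaces A's scatter (mutating a min_W x kernel_size 0/1 matrix from each window, then packing every row via join of reversed digit strings parsed base 2) by a gather: it builds each output word directly, testing for every data position i and tap i_fw with divmod(i + pad - i_fw, stride) whether some window in range(min_oW) reads position i through that tap, and adding 1 << i_fw when it does; no matrix, no mutation, no string pass.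
-- outside the precondition, e.g. on compute_conv1d_instructions(1, 0, 1, -8, 0): A returns (1, [1]), B returns (1, [1])
import Mathlib
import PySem

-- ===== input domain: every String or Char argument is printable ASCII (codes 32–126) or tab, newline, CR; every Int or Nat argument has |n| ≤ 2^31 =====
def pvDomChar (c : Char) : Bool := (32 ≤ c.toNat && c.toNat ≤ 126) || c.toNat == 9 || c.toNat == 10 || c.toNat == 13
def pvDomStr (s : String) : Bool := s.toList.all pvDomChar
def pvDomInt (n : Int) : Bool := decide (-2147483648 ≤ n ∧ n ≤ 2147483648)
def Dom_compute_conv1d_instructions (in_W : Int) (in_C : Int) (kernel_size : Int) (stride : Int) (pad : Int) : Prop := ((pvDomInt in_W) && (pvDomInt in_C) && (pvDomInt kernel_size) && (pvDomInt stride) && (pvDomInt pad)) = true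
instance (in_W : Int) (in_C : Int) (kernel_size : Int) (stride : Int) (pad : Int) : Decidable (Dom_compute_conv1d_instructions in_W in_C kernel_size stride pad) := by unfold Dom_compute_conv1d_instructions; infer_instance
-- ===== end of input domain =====

-- B replaces A's scatter over a 0/1 bit matrix plus string-packing pass by a direct
-- gather: each output word is built per data index from a divisibility test (alternative
-- decomposition; no mutation, same asymptotic cost).


-- ===== PORT A =====

-- math.ceil(a / b): exact for integer arguments with b ≠ 0 (Pre_ supplies stride ≥ 1, kernel_size ≠ 0)
def pyCeilDiv (a b : Int) : Int := -(PySem.Int.floordiv (-a) b)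

-- Python 'l[i] = …' as a pure update: wraps a negative index, no-op when the
-- index is out of range (Python raises IndexError there; under Pre_ every update is in range)
def pyModifyI {α : Type} (l : List α) (i : Int) (f : α → α) : List α :=
  let j : Int := if i < 0 then i + l.length else i
  if 0 ≤ j then l.modify j.toNat f else l

-- int(''.join(str(p) for p in reversed(row)), 2): exact for rows whose entries are the digits
-- 0/1 (the only values A ever stores); Python's ValueError on an empty row is unreachable under Pre_
def rowToInt (row : List Int) : Int := row.reverse.foldl (fun acc p => acc * 2 + p) 0

def compute_conv1d_instructions (in_W : Int) (in_C : Int) (kernel_size : Int) (stride : Int) (pad : Int) : Int × List Int :=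
  let min_W : Int :=
    if kernel_size ≥ stride then (pyCeilDiv kernel_size stride - 1) * stride + kernel_size
    else (pyCeilDiv stride kernel_size - 1) * stride + kernel_size
  let min_W := if min_W > in_W then in_W else min_W
  let min_oW := PySem.Int.floordiv (min_W - kernel_size) stride + 1
  let out_W := PySem.Int.floordiv (in_W - kernel_size) stride + 1
  let scaled_W := (out_W - 1) * stride + kernel_size
  let min_W := if scaled_W < in_W then min_W + 1 else min_W
  let windows_bin : List (List Int) :=
    (PySem.List.pyRange 0 min_W 1).map (fun _ => (PySem.List.pyRange 0 kernel_size 1).map (fun _ => (0 : Int)))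
  let windows_bin :=
    (PySem.List.pyRange 0 min_oW 1).foldl (fun M i_ow =>
      (PySem.List.pyRange 0 kernel_size 1).foldl (fun M i_fw =>
        pyModifyI M (i_ow * stride + i_fw - pad) (fun row => pyModifyI row i_fw (fun _ => 1))) M)
      windows_bin
  let windows_int :=
    (PySem.List.pyRange 0 min_W 1).foldl (fun acc i =>
      acc ++ [rowToInt (PySem.List.pyGetD windows_bin i [])]) []
  (min_W, windows_int)

-- ===== PORT B =====

def compute_conv1d_instructions_alt (in_W : Int) (in_C : Int) (kernel_size : Int) (stride : Int) (pad : Int) : Int × List Int :=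
  let min_W : Int :=
    if kernel_size ≥ stride then (pyCeilDiv kernel_size stride - 1) * stride + kernel_size
    else (pyCeilDiv stride kernel_size - 1) * stride + kernel_size
  let min_W := if min_W > in_W then in_W else min_W
  let min_oW := PySem.Int.floordiv (min_W - kernel_size) stride + 1
  let out_W := PySem.Int.floordiv (in_W - kernel_size) stride + 1
  let scaled_W := (out_W - 1) * stride + kernel_size
  let min_W := if scaled_W < in_W then min_W + 1 else min_W
  -- gather: for each data position i, word accumulates 1 << i_fw whenever some window
  -- i_ow ∈ range(min_oW) reads position i through tap i_fw; 'divmod' is floordiv/mod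
  let windows_int : List Int :=
    (PySem.List.pyRange 0 min_W 1).map (fun i =>
      (PySem.List.pyRange 0 kernel_size 1).foldl (fun word i_fw =>
        let i_ow := PySem.Int.floordiv (i + pad - i_fw) stride
        let r := PySem.Int.mod (i + pad - i_fw) stride
        if r = 0 ∧ 0 ≤ i_ow ∧ i_ow < min_oW then word + (1 : Int) <<< i_fw.toNat else word) 0)
  (min_W, windows_int)

-- ===== PRECONDITION & SPEC =====

-- Pre_ excludes: pad ≠ 0 (assert fails), stride = 0 and kernel_size = 0 (ZeroDivisionError).
-- It also excludes stride ≤ -1: a negative stride is outside the natural domain of a convolution;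
-- there A raises IndexError on a large class of inputs and, where it returns, its value rests on
-- Python's negative-index wraparound, which this file does not claim (on the cited excluded
-- input both programs in fact return the same value).
def Pre_compute_conv1d_instructions (in_W : Int) (in_C : Int) (kernel_size : Int) (stride : Int) (pad : Int) : Prop :=
  pad = 0 ∧ 1 ≤ stride ∧ kernel_size ≠ 0
instance (in_W : Int) (in_C : Int) (kernel_size : Int) (stride : Int) (pad : Int) : Decidable (Pre_compute_conv1d_instructions in_W in_C kernel_size stride pad) := by unfold Pre_compute_conv1d_instructions; infer_instance

def pvWitness_compute_conv1d_instructions : Int × Int × Int × Int × Int := (8, 3, 3, 1, 0)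

def Spec_compute_conv1d_instructions (in_W : Int) (in_C : Int) (kernel_size : Int) (stride : Int) (pad : Int) (out : Int × List Int) : Prop := out = compute_conv1d_instructions_alt in_W in_C kernel_size stride pad
instance (in_W : Int) (in_C : Int) (kernel_size : Int) (stride : Int) (pad : Int) (out : Int × List Int) : Decidable (Spec_compute_conv1d_instructions in_W in_C kernel_size stride pad out) := by unfold Spec_compute_conv1d_instructions; infer_instance

-- ===== CLAIM (what is proved, stated in full; the proofs are below) =====
def Claim_equal_compute_conv1d_instructions : Prop := ∀ (in_W : Int) (in_C : Int) (kernel_size : Int) (stride : Int) (pad : Int), Dom_compute_conv1d_instructions in_W in_C kernel_size stride pad → Pre_compute_conv1d_instructions in_W in_C kernel_size stride pad → Spec_compute_conv1d_instructions in_W in_C kernel_size stride pad (compute_conv1d_instructions in_W in_C kernel_size stride pad)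

-- ===== LEMMAS AND PROOFS =====

lemma rowToInt_eq_foldr (row : List Int) : rowToInt row = row.foldr (fun p acc => acc * 2 + p) 0 := by
  simp [rowToInt, List.foldl_reverse]

lemma rowToInt_cons (a : Int) (t : List Int) : rowToInt (a :: t) = rowToInt t * 2 + a := by
  simp [rowToInt_eq_foldr]

-- int(row reversed, base 2) is the little-endian weighted sum of the row's entries
lemma rowToInt_eq_sum (row : List Int) :
    rowToInt row = ((List.range row.length).map (fun j => row.getD j 0 * 2 ^ j)).sum := by
  induction row with
  | nil => rfl
  | cons a t ih =>
    rw [rowToInt_cons, ih]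
    simp only [List.length_cons, List.range_succ_eq_map, List.map_cons, List.map_map,
      List.sum_cons, Function.comp_def, List.getD_cons_zero, List.getD_cons_succ]
    have : ∀ j : Nat, t.getD j 0 * 2 ^ (j + 1) = (t.getD j 0 * 2 ^ j) * 2 := by
      intro j; ring
    simp only [this, List.sum_map_mul_right]
    ring

lemma pyModifyI_natCast {α : Type} (l : List α) (n : Nat) (f : α → α) :
    pyModifyI l (↑n) f = l.modify n f := by
  simp only [pyModifyI]
  have h1 : ¬ ((n:Int) < 0) := by omega
  simp [h1]

lemma pyModifyI_index {α : Type} (S ow fw : Nat) (l : List α) (f : α → α) :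
    pyModifyI l ((ow : Int) * (S : Int) + (fw : Int)) f = l.modify (ow * S + fw) f := by
  have h : ((ow : Int) * (S : Int) + (fw : Int)) = ((ow * S + fw : Nat) : Int) := by push_cast; ring
  rw [h, pyModifyI_natCast]

lemma one_shiftLeft_int (n : Nat) : (1 : Int) <<< n = 2 ^ n := by
  rw [Int.shiftLeft_eq]; ring

-- A's nested scatter loop, flattened to one fold over the list of (window, tap) pairs
lemma A_fold_flat (S : Nat) (l1 l2 : List Nat) :
    ∀ (M : List (List Int)),
    l1.foldl (fun M ow => l2.foldl (fun M fw =>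
        M.modify (ow * S + fw) (fun row => row.modify fw (fun _ => (1:Int)))) M) M
    = (l1.flatMap (fun ow => l2.map (fun fw => (ow, fw)))).foldl
        (fun M p => M.modify (p.1 * S + p.2) (fun row => row.modify p.2 (fun _ => (1:Int)))) M := by
  induction l1 with
  | nil => intro M; rfl
  | cons a t ih => intro M; simp [List.foldl_append, List.foldl_map, ih]

lemma length_foldl_stepA (S : Nat) (P : List (Nat × Nat)) :
    ∀ (M : List (List Int)),
    (P.foldl (fun M p => M.modify (p.1 * S + p.2) (fun row => row.modify p.2 (fun _ => (1:Int)))) M).length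
      = M.length := by
  induction P with
  | nil => intro M; rfl
  | cons p t ih =>
    intro M
    simp only [List.foldl_cons]
    exact Eq.trans (ih _) (List.length_modify ..)

lemma rows_foldl_stepA (S K : Nat) (P : List (Nat × Nat)) :
    ∀ (M : List (List Int)),
    (∀ j (h : j < M.length), (M[j]'h).length = K) →
    ∀ j (h : j < (P.foldl (fun M p => M.modify (p.1 * S + p.2) (fun row => row.modify p.2 (fun _ => (1:Int)))) M).length),
      ((P.foldl (fun M p => M.modify (p.1 * S + p.2) (fun row => row.modify p.2 (fun _ => (1:Int)))) M)[j]'h).length = K := by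
  induction P with
  | nil => intro M hM j h; exact hM j h
  | cons p t ih =>
    intro M hM j h
    refine ih _ ?_ j h
    intro j hj
    have hj' : j < M.length := by simpa using hj
    rw [List.getElem_modify]
    split_ifs with hdi
    · exact Eq.trans (List.length_modify ..) (hM _ hj')
    · exact hM _ hj'

-- the (i, fw) entry of A's final bit matrix: 1 exactly when some pair of the scatter list hits it
lemma entry_foldA (S K : Nat) (P : List (Nat × Nat)) :
    ∀ (M : List (List Int)),
    (∀ j (h : j < M.length), (M[j]'h).length = K) →
    ∀ i fw, i < M.length → fw < K →
    ((P.foldl (fun M p => M.modify (p.1 * S + p.2) (fun row => row.modify p.2 (fun _ => (1:Int)))) M).getD i []).getD fw 0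
      = if ∃ p ∈ P, p.1 * S + p.2 = i ∧ p.2 = fw then 1 else (M.getD i []).getD fw 0 := by
  induction P with
  | nil => intro M _ i fw _ _; simp
  | cons p t ih =>
    intro M hM i fw hi hfw
    simp only [List.foldl_cons]
    set M' := M.modify (p.1 * S + p.2) (fun row => row.modify p.2 (fun _ => (1:Int))) with hM'
    have hlen' : M'.length = M.length := List.length_modify ..
    have hMrows' : ∀ j (h : j < M'.length), (M'[j]'h).length = K := by
      intro j hj
      have hj' : j < M.length := by omega
      simp only [hM', List.getElem_modify]
      split_ifs with hdi
      · exact Eq.trans (List.length_modify ..) (hM _ hj')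
      · exact hM _ hj'
    have hstep : (M'.getD i []).getD fw 0
        = if p.1 * S + p.2 = i ∧ p.2 = fw then 1 else (M.getD i []).getD fw 0 := by
      rw [List.getD_eq_getElem M' [] (by omega)]
      simp only [hM', List.getElem_modify]
      by_cases hd : p.1 * S + p.2 = i
      · rw [if_pos hd]
        have hrl : fw < ((M[i]'hi).modify p.2 (fun _ => (1:Int))).length := by
          rw [List.length_modify, hM i hi]; exact hfw
        rw [List.getD_eq_getElem _ 0 hrl, List.getElem_modify]
        by_cases h2 : p.2 = fw
        · rw [if_pos h2, if_pos ⟨hd, h2⟩]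
        · rw [if_neg h2, if_neg (fun hc => h2 hc.2),
            List.getD_eq_getElem M [] hi, List.getD_eq_getElem _ 0 (by rw [hM i hi]; exact hfw)]
      · rw [if_neg hd, if_neg (fun hc => hd hc.1), List.getD_eq_getElem M [] hi]
    rw [ih M' hMrows' i fw (by omega) hfw, hstep]
    by_cases ht : ∃ q ∈ t, q.1 * S + q.2 = i ∧ q.2 = fw
    · have : ∃ q ∈ p :: t, q.1 * S + q.2 = i ∧ q.2 = fw := by
        obtain ⟨q, hq, hqq⟩ := ht; exact ⟨q, List.mem_cons_of_mem _ hq, hqq⟩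
      rw [if_pos ht, if_pos this]
    · rw [if_neg ht]
      by_cases hp : p.1 * S + p.2 = i ∧ p.2 = fw
      · have : ∃ q ∈ p :: t, q.1 * S + q.2 = i ∧ q.2 = fw := ⟨p, List.mem_cons_self, hp⟩
        rw [if_pos hp, if_pos this]
      · have : ¬ ∃ q ∈ p :: t, q.1 * S + q.2 = i ∧ q.2 = fw := by
          rintro ⟨q, hq, hqq⟩
          rcases List.mem_cons.mp hq with rfl | hq'
          · exact hp hqq
          · exact ht ⟨q, hq', hqq⟩
        rw [if_neg hp, if_neg this]

-- a guarded accumulation is the sum of the guarded contributions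
lemma foldl_if_add {α : Type} (l : List α) (c : α → Prop) [DecidablePred c] (g : α → Int) (a : Int) :
    l.foldl (fun w x => if c x then w + g x else w) a
      = a + (l.map (fun x => if c x then g x else 0)).sum := by
  have h : (fun (w : Int) x => if c x then w + g x else w)
      = fun (w : Int) x => w + (if c x then g x else 0) := by
    funext w x; split_ifs <;> simp
  rw [h, PySem.List.foldl_add]

-- B's divisibility test picks out exactly the windows A scatters from
lemma cond_iff (S : Nat) (hS : 1 ≤ S) (mOW : Int) (i j : Nat) :
    (PySem.Int.mod ((i:Int) - (j:Int)) (S:Int) = 0 ∧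
     0 ≤ PySem.Int.floordiv ((i:Int) - (j:Int)) (S:Int) ∧
     PySem.Int.floordiv ((i:Int) - (j:Int)) (S:Int) < mOW)
    ↔ ∃ ow, ow < mOW.toNat ∧ ow * S + j = i := by
  have hS' : (0:Int) < S := by exact_mod_cast hS
  constructor
  · rintro ⟨hr, hq0, hqm⟩
    have hchar := PySem.Int.floordiv_mul_add_mod ((i:Int) - (j:Int)) (S:Int)
    set q := PySem.Int.floordiv ((i:Int) - (j:Int)) (S:Int) with hq
    refine ⟨q.toNat, by omega, ?_⟩
    have hcast : ((q.toNat * S + j : Nat) : Int) = (i : Int) := by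
      push_cast [Int.toNat_of_nonneg hq0]
      omega
    exact_mod_cast hcast
  · rintro ⟨ow, how, hval⟩
    have hval' : ((i:Int) - (j:Int)) = (ow : Int) * (S : Int) := by
      have : ((ow * S + j : Nat) : Int) = (i : Int) := by exact_mod_cast hval
      push_cast at this
      omega
    have hmod : PySem.Int.mod ((i:Int) - (j:Int)) (S:Int) = 0 := by
      rw [(PySem.Int.mod_eq_zero_iff_dvd _ _), hval']
      exact Dvd.intro_left _ rfl
    have hdiv : PySem.Int.floordiv ((i:Int) - (j:Int)) (S:Int) = (ow : Int) := by
      rw [PySem.Int.floordiv_eq_iff_of_pos hS', hval']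
      constructor
      · linarith
      · nlinarith
    refine ⟨hmod, by rw [hdiv]; positivity, ?_⟩
    rw [hdiv]
    omega

-- (window, tap) pair membership in A's flattened scatter list, as an arithmetic condition
lemma hit_iff (S OW K : Nat) (i j : Nat) (hj : j < K) :
    (∃ p ∈ (List.range OW).flatMap (fun ow => (List.range K).map (fun fw => (ow, fw))),
        p.1 * S + p.2 = i ∧ p.2 = j)
    ↔ ∃ ow, ow < OW ∧ ow * S + j = i := by
  constructor
  · rintro ⟨p, hp, h1, rfl⟩
    simp only [List.mem_flatMap, List.mem_map, List.mem_range] at hp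
    obtain ⟨ow, how, fw, _, hpe⟩ := hp
    refine ⟨p.1, ?_, h1⟩
    have : p.1 = ow := by rw [← hpe]
    omega
  · rintro ⟨ow, how, hval⟩
    refine ⟨(ow, j), ?_, hval, rfl⟩
    simp only [List.mem_flatMap, List.mem_map, List.mem_range]
    exact ⟨ow, how, j, hj, rfl⟩

-- the heart of the equivalence: A's scatter-then-pack windows equal B's gathered words
lemma windows_eq_pos (s k mW mOW : Int) (hs : 1 ≤ s) (hk : 1 ≤ k)
    (hb : (mOW - 1) * s + k ≤ mW) :
    (PySem.List.pyRange 0 mW 1).foldl (fun acc i => acc ++ [rowToInt (PySem.List.pyGetD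
        ((PySem.List.pyRange 0 mOW 1).foldl (fun M i_ow =>
          (PySem.List.pyRange 0 k 1).foldl (fun M i_fw =>
            pyModifyI M (i_ow * s + i_fw - 0) (fun row => pyModifyI row i_fw (fun _ => 1))) M)
          ((PySem.List.pyRange 0 mW 1).map (fun _ => (PySem.List.pyRange 0 k 1).map (fun _ => (0:Int)))))
        i [])]) []
    = (PySem.List.pyRange 0 mW 1).map (fun i =>
        (PySem.List.pyRange 0 k 1).foldl (fun word i_fw =>
          if PySem.Int.mod (i + 0 - i_fw) s = 0 ∧ 0 ≤ PySem.Int.floordiv (i + 0 - i_fw) s ∧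
              PySem.Int.floordiv (i + 0 - i_fw) s < mOW
          then word + (1 : Int) <<< i_fw.toNat else word) 0) := by
  lift s to ℕ using (by omega : (0:Int) ≤ s) with S
  have hS : 1 ≤ S := by exact_mod_cast hs
  simp only [PySem.List.pyRange_one, zero_add, add_zero, sub_zero, List.foldl_map, List.map_map,
    Function.comp_def, pyModifyI_index, pyModifyI_natCast, Int.toNat_natCast,
    one_shiftLeft_int, PySem.List.pyGetD_natCast]
  rw [A_fold_flat S (List.range mOW.toNat) (List.range k.toNat)]
  have hM0 : List.map (fun _ => List.map (fun _ => (0:Int)) (List.range k.toNat)) (List.range mW.toNat)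
      = List.replicate mW.toNat (List.replicate k.toNat 0) := by
    simp [List.map_const']
  rw [hM0, PySem.List.foldl_append_singleton_eq_map, List.nil_append]
  set K := k.toNat with hK
  set P := (List.range mOW.toNat).flatMap (fun ow => (List.range K).map (fun fw => (ow, fw))) with hP
  set M0 := List.replicate mW.toNat (List.replicate K (0:Int)) with hM0d
  have hM0rows : ∀ j (h : j < M0.length), (M0[j]'h).length = K := by
    intro j h; simp [hM0d]
  have hM0len : M0.length = mW.toNat := by simp [hM0d]
  have hbound : ∀ p ∈ P, p.1 * S + p.2 < M0.length ∧ p.2 < K := by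
    intro p hp
    simp only [hP, List.mem_flatMap, List.mem_map, List.mem_range] at hp
    obtain ⟨ow, how, fw, hfw, rfl⟩ := hp
    dsimp only
    refine ⟨?_, hfw⟩
    rw [hM0len]
    have c1 : ((ow : Int)) ≤ mOW - 1 := by omega
    have c2 : ((ow : Int)) * ↑S ≤ (mOW - 1) * ↑S :=
      mul_le_mul_of_nonneg_right c1 (by omega)
    have c3 : ((fw : Int)) < k := by omega
    have : ((ow * S + fw : Nat) : Int) < mW := by push_cast; linarith
    omega
  apply List.map_congr_left
  intro n hn
  have hi : n < mW.toNat := List.mem_range.mp hn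
  have hfinlen : (P.foldl (fun M p => M.modify (p.1 * S + p.2) (fun row => row.modify p.2 (fun _ => (1:Int)))) M0).length = mW.toNat :=
    Eq.trans (length_foldl_stepA ..) hM0len
  have hrowlen : ((P.foldl (fun M p => M.modify (p.1 * S + p.2) (fun row => row.modify p.2 (fun _ => (1:Int)))) M0).getD n []).length = K := by
    rw [List.getD_eq_getElem _ [] (by omega)]
    exact rows_foldl_stepA S K P M0 hM0rows n (by omega)
  rw [rowToInt_eq_sum, hrowlen, foldl_if_add, zero_add]
  apply congrArg List.sum
  apply List.map_congr_left
  intro j hj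
  have hjK : j < K := List.mem_range.mp hj
  rw [entry_foldA S K P M0 hM0rows n j (by omega) hjK]
  have hzero : (M0.getD n []).getD j 0 = 0 := by
    rw [hM0d, List.getD_eq_getElem _ [] (by simpa using hi)]
    simp [hjK]
  rw [hzero]
  have hcond := cond_iff S hS mOW n j
  have hhit := hit_iff S mOW.toNat K n j hjK
  by_cases hc : ∃ ow, ow < mOW.toNat ∧ ow * S + j = n
  · rw [if_pos (hhit.mpr hc), if_pos (hcond.mpr hc)]; ring
  · rw [if_neg (fun h => hc (hhit.mp h)), if_neg (fun h => hc (hcond.mp h))]; ring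

-- with a nonpositive kernel the standard min_W is at most -2, so both windows lists are empty
lemma minW_nonpos (s k : Int) (hs : 1 ≤ s) (hk : k ≤ -1) :
    (pyCeilDiv s k - 1) * s + k ≤ -2 := by
  have hq : 0 ≤ PySem.Int.floordiv (-s) k := by
    by_contra hneg
    push_neg at hneg
    have hchar := PySem.Int.floordiv_mul_add_mod (-s) k
    have hbnd := PySem.Int.mod_neg_bounds (-s) (show k < 0 by omega)
    set q := PySem.Int.floordiv (-s) k with hqd
    have hq1 : q ≤ -1 := by omega
    have : q * k ≥ (-1) * k := by
      have := mul_le_mul_of_nonpos_right hq1 (by omega : k ≤ 0)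
      linarith
    omega
  have h1 : pyCeilDiv s k ≤ 0 := by
    unfold pyCeilDiv; omega
  have h2 : (pyCeilDiv s k - 1) * s ≤ (-1) * s := by
    apply mul_le_mul_of_nonneg_right (by omega) (by omega)
  omega

theorem compute_conv1d_instructions_spec : Claim_equal_compute_conv1d_instructions := by
  intro in_W in_C k s pad hdom hpre
  obtain ⟨hpad, hs, hk0⟩ := hpre
  subst hpad
  unfold Spec_compute_conv1d_instructions
  simp only [compute_conv1d_instructions, compute_conv1d_instructions_alt]
  set f0 := (if k ≥ s then (pyCeilDiv k s - 1) * s + k else (pyCeilDiv s k - 1) * s + k) with hf0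
  set mW1 := (if f0 > in_W then in_W else f0) with hmW1
  set mOW := PySem.Int.floordiv (mW1 - k) s + 1 with hmOW
  set out_W := PySem.Int.floordiv (in_W - k) s + 1 with hout
  set scaled_W := (out_W - 1) * s + k with hscaled
  set mW := (if scaled_W < in_W then mW1 + 1 else mW1) with hmW
  refine congrArg (Prod.mk mW) ?_
  rcases (by omega : k ≤ -1 ∨ 1 ≤ k) with hkneg | hkpos
  · -- kernel_size ≤ -1: min_W ≤ -1, both window lists are empty
    have hbr : ¬ (k ≥ s) := by omega
    have hf0le : f0 ≤ -2 := by
      rw [hf0, if_neg hbr]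
      exact minW_nonpos s k hs (by omega)
    have hmWle : mW ≤ 0 := by
      rw [hmW, hmW1]
      split_ifs <;> omega
    have hr : PySem.List.pyRange 0 mW 1 = [] := by
      simp [PySem.List.pyRange_one]
      omega
    rw [hr]
    simp
  · -- kernel_size ≥ 1: the main case
    have hb : (mOW - 1) * s + k ≤ mW := by
      have h1 := PySem.Int.floordiv_mul_add_mod (mW1 - k) s
      have h2 : 0 ≤ PySem.Int.mod (mW1 - k) s := PySem.Int.mod_nonneg _ (by omega)
      have h3 : mW1 ≤ mW := by rw [hmW]; split <;> omega
      have h4 : (mOW - 1) * s = PySem.Int.floordiv (mW1 - k) s * s := by rw [hmOW]; ring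
      linarith
    exact windows_eq_pos s k mW mOW hs (by omega) hb
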